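-- pv_equiv track=rewrite | github.com/kgaleziowski/python-database-normalization | norm.py | combo
-- ===== SOURCE A (Python) =====
-- from itertools import combinations
--
-- def combo(attributes):
--     length = len(attributes)
--     temp = []
--     for i in range(length):
--         if i == 0:
--             for j in attributes:
--                 temp.append(j)
--         else:
--             combs = combinations(attributes, i+1)
--             for combo in combs:
--                 combo = sorted(combo)
--                 temp.append(','.join(combo))
--     sorted_alphabetically = sorted(temp)
--     sorted_len_alpha = sorted(sorted_alphabetically,key=len)
--     return sorted_len_alpha
-- ===== SOURCE B (Python) =====
-- def combo(attributes):
--     subsets = [[]]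
--     for a in attributes:
--         subsets = subsets + [s + [a] for s in subsets]
--     temp = [','.join(sorted(s)) for s in subsets if s]
--     return sorted(temp, key=lambda s: (len(s), s))
-- ===== Notes on version B (the rewrite author's own statement) =====
-- stated objective: simpler
-- what changed: A loops over subset sizes calling itertools.combinations per size, appends size-1 elements raw, and sorts the result twice (alphabetically, then stably by length); B builds the whole power set once by iterative subset-doubling, joins each non-empty subset, and does a single sort with key (len, s).
import Mathlib
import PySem

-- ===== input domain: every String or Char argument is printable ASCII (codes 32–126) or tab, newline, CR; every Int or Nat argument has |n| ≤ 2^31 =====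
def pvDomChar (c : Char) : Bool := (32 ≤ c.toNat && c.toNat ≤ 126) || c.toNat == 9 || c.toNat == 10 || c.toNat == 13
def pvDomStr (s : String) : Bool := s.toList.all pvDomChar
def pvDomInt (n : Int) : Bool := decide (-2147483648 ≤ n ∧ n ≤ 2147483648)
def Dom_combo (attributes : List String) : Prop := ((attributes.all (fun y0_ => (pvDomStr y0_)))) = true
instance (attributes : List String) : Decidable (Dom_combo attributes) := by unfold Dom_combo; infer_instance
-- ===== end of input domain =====

-- B replaces A's per-size itertools.combinations loops and double sort by an iterative
-- subset-doubling power-set build and one sort with key (len, s); same return value.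

-- ===== PORT A =====
def combo (attributes : List String) : List String :=
  let length := PySem.List.len attributes
  let temp : List String :=
    (PySem.List.pyRange 0 length 1).foldl (fun temp i =>
      if i == 0 then
        attributes.foldl (fun temp j => temp ++ [j]) temp
      else
        (PySem.List.combinations attributes (i + 1).toNat).foldl
          (fun temp c => temp ++ [PySem.Str.join "," (PySem.List.sorted c (fun s => s) false)]) temp) []
  let sorted_alphabetically := PySem.List.sorted temp (fun s => s) false
  let sorted_len_alpha := PySem.List.sorted sorted_alphabetically PySem.Str.len false
  sorted_len_alpha

-- ===== PORT B =====
def combo_alt (attributes : List String) : List String :=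
  let subsets := attributes.foldl (fun subsets a => subsets ++ subsets.map (fun s => s ++ [a])) [[]]
  let temp := (subsets.filter (fun s => !s.isEmpty)).map
    (fun s => PySem.Str.join "," (PySem.List.sorted s (fun s => s) false))
  PySem.List.sorted2 temp PySem.Str.len (fun s => s) false

-- ===== PRECONDITION & SPEC =====
def Spec_combo (attributes : List String) (out : List String) : Prop := out = combo_alt attributes
instance (attributes : List String) (out : List String) : Decidable (Spec_combo attributes out) := by unfold Spec_combo; infer_instance

-- ===== CLAIM (what is proved, stated in full; the proofs are below) =====
def Claim_equal_combo : Prop := ∀ (attributes : List String), Dom_combo attributes → Spec_combo attributes (combo attributes)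

-- ===== LEMMAS AND PROOFS =====

-- the joined, alphabetically sorted subset — the value both programs store per subset
def pvF (s : List String) : String := PySem.Str.join "," (PySem.List.sorted s (fun s => s) false)

-- the (length, then alphabetical) order both final lists satisfy
def pvR (a b : String) : Prop :=
  PySem.Str.len a < PySem.Str.len b ∨ (PySem.Str.len a = PySem.Str.len b ∧ a ≤ b)

def pvK (s : String) : Lex (ℤ × String) := toLex (PySem.Str.len s, s)

theorem pvK_le_iff (a b : String) : pvK a ≤ pvK b ↔ pvR a b := by
  simp [pvK, pvR, Prod.Lex.le_iff]

theorem pvK_inj : Function.Injective pvK := by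
  intro a b h
  simpa using congrArg (fun x => (ofLex x).2) h

theorem pvF_singleton (a : String) : pvF [a] = a := by
  simp [pvF, PySem.List.sorted, PySem.List.insertBy, PySem.Str.join]

-- B's subset-doubling loop builds exactly List.sublists
theorem pv_doubling (l : List String) :
    l.foldl (fun subsets a => subsets ++ subsets.map (fun s => s ++ [a])) [[]] = l.sublists := by
  induction l using List.reverseRecOn with
  | nil => simp
  | append_singleton l a ih => simp [List.foldl_append, ih, List.sublists_concat]

-- itertools.combinations enumerates a permutation of sublistsLen
theorem pv_comb_perm (xs : List String) (r : ℕ) :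
    (PySem.List.combinations xs r).Perm (List.sublistsLen r xs) := by
  induction xs generalizing r with
  | nil => cases r <;> simp [PySem.List.combinations_zero, PySem.List.combinations_nil_succ]
  | cons x xs ih =>
      cases r with
      | zero => simp [PySem.List.combinations_zero]
      | succ r =>
          rw [PySem.List.combinations_cons_succ, List.sublistsLen_succ_cons]
          exact (((ih r).map _).append (ih (r + 1))).trans List.perm_append_comm

theorem pv_flatMap_perm {l : List ℕ} {F G : ℕ → List (List String)}
    (h : ∀ x ∈ l, (F x).Perm (G x)) : (l.flatMap F).Perm (l.flatMap G) := by
  induction l with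
  | nil => simp
  | cons x t ih =>
      simp only [List.flatMap_cons]
      exact (h x (by simp)).append (ih fun y hy => h y (by simp [hy]))

-- A's temp loop is the size-by-size flatMap of joined combinations
theorem pv_tempA (attributes : List String) :
    (PySem.List.pyRange 0 (PySem.List.len attributes) 1).foldl (fun temp i =>
      if i == 0 then
        attributes.foldl (fun temp j => temp ++ [j]) temp
      else
        (PySem.List.combinations attributes (i + 1).toNat).foldl
          (fun temp c => temp ++ [pvF c]) temp) []
    = (List.range attributes.length).flatMap
        (fun k => (PySem.List.combinations attributes (k + 1)).map pvF) := by
  rw [PySem.List.len_eq, PySem.List.pyRange_zero_natCast, List.foldl_map]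
  refine (PySem.List.foldl_congr_mem _ _
    (fun acc (k : ℕ) => acc ++ (PySem.List.combinations attributes (k + 1)).map pvF) _
    ?_).trans ((PySem.List.foldl_append_eq_flatMap _ _ _).trans (List.nil_append _))
  intro acc k _
  by_cases hk : k = 0
  · subst hk
    simp only [Nat.cast_zero, beq_self_eq_true, if_true,
      PySem.List.foldl_append_singleton_eq_self]
    rw [show 0 + 1 = 1 from rfl, PySem.List.combinations_one, List.map_map,
      List.map_congr_left (g := id) (fun a _ => by simpa using pvF_singleton a), List.map_id]
  · rw [if_neg (by simpa using fun h => hk (by exact_mod_cast h))]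
    rw [show ((k : ℤ) + 1).toNat = k + 1 from by omega]
    exact PySem.List.foldl_append_singleton_eq_map _ _ _

-- the multiset of nonempty subsets: A's size-grouped enumeration ~ B's filtered power set
theorem pv_perm (attributes : List String) :
    ((List.range attributes.length).flatMap
        (fun k => PySem.List.combinations attributes (k + 1))).Perm
      (attributes.sublists.filter (fun s => !s.isEmpty)) := by
  have h1 : ([[]] ++ (List.range attributes.length).flatMap
      (fun k => PySem.List.combinations attributes (k + 1))).Perm attributes.sublists := by
    have h2 : ([([] : List String)] ++ (List.range attributes.length).flatMap
        (fun k => List.sublistsLen (k + 1) attributes))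
        = (List.range (attributes.length + 1)).flatMap (fun r => List.sublistsLen r attributes) := by
      rw [List.range_succ_eq_map, List.flatMap_cons, List.sublistsLen_zero]
      congr 1
      rw [List.flatMap_map]
    refine ((List.Perm.append (List.Perm.refl _) (pv_flatMap_perm
        (fun k _ => pv_comb_perm attributes (k + 1)))).trans ?_)
    rw [h2]
    exact (List.range_bind_sublistsLen_perm attributes).trans
      (List.sublists_perm_sublists' attributes).symm
  have h3 := h1.filter (fun s => !s.isEmpty)
  rw [List.filter_append] at h3
  have h4 : List.filter (fun s => !s.isEmpty) [([] : List String)] = [] := by simp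
  have h5 : List.filter (fun s => !s.isEmpty)
      ((List.range attributes.length).flatMap (fun k => PySem.List.combinations attributes (k + 1)))
      = (List.range attributes.length).flatMap (fun k => PySem.List.combinations attributes (k + 1)) := by
    refine List.filter_eq_self.mpr (fun s hs => ?_)
    rcases List.mem_flatMap.mp hs with ⟨k, _, hk⟩
    have := PySem.List.length_of_mem_combinations hk
    simp [← List.length_eq_zero_iff, this]
  rw [h4, h5, List.nil_append] at h3
  exact h3

-- ordering of A's final double sort: stable len-sort of an alphabetically sorted list
theorem pv_insA (x : String) (acc : List String) (hacc : acc.Pairwise pvR)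
    (hle : ∀ y ∈ acc, y ≤ x) :
    (PySem.List.insertBy (fun a b => decide (PySem.Str.len a < PySem.Str.len b)) x acc).Pairwise pvR := by
  induction acc with
  | nil => simp [PySem.List.insertBy]
  | cons y ys ih =>
      rw [show PySem.List.insertBy (fun a b => decide (PySem.Str.len a < PySem.Str.len b)) x (y :: ys)
          = if PySem.Str.len x < PySem.Str.len y then x :: y :: ys
            else y :: PySem.List.insertBy (fun a b => decide (PySem.Str.len a < PySem.Str.len b)) x ys
          from by simp [PySem.List.insertBy]]
      split_ifs with h
      · refine List.Pairwise.cons (fun w hw => ?_) hacc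
        rcases List.mem_cons.mp hw with rfl | hw
        · exact Or.inl h
        · rcases (List.pairwise_cons.mp hacc).1 w hw with h2 | h2
          · exact Or.inl (h.trans h2)
          · exact Or.inl (lt_of_lt_of_le h (le_of_eq h2.1))
      · refine List.Pairwise.cons (fun w hw => ?_) ?_
        · rcases (PySem.List.mem_insertBy _ x w ys).mp hw with rfl | hw
          · rcases lt_or_eq_of_le (not_lt.mp h) with h2 | h2
            · exact Or.inl h2
            · exact Or.inr ⟨h2, hle y (by simp)⟩
          · exact (List.pairwise_cons.mp hacc).1 w hw
        · exact ih (List.pairwise_cons.mp hacc).2 (fun y hy => hle y (by simp [hy]))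

theorem pv_foldA (l : List String) (hl : l.Pairwise (· ≤ ·)) :
    ∀ acc, acc.Pairwise pvR → (∀ y ∈ acc, ∀ x ∈ l, y ≤ x) →
      (l.foldl (fun acc x =>
        PySem.List.insertBy (fun a b => decide (PySem.Str.len a < PySem.Str.len b)) x acc) acc).Pairwise pvR := by
  induction l with
  | nil => intro acc hacc _; simpa using hacc
  | cons x t ih =>
      intro acc hacc hle
      simp only [List.foldl_cons]
      refine ih (List.pairwise_cons.mp hl).2 _
        (pv_insA x acc hacc (fun y hy => hle y hy x (by simp))) (fun y hy z hz => ?_)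
      rcases (PySem.List.mem_insertBy _ x y acc).mp hy with rfl | hy
      · exact (List.pairwise_cons.mp hl).1 z hz
      · exact hle y hy z (by simp [hz])

theorem pv_pairwiseA (l : List String) (hl : l.Pairwise (· ≤ ·)) :
    (PySem.List.sorted l PySem.Str.len false).Pairwise pvR := by
  rw [PySem.List.sorted_eq_foldl_insertBy]
  exact pv_foldA l hl [] (by simp) (by simp)

-- ordering of B's single lexicographic sort
theorem pv_insB (x : String) (acc : List String) (hacc : acc.Pairwise pvR) :
    (PySem.List.insertBy (fun a b => decide (PySem.Str.len a < PySem.Str.len b) ||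
      (!decide (PySem.Str.len b < PySem.Str.len a) && decide (a < b))) x acc).Pairwise pvR := by
  induction acc with
  | nil => simp [PySem.List.insertBy]
  | cons y ys ih =>
      rw [show PySem.List.insertBy (fun a b => decide (PySem.Str.len a < PySem.Str.len b) ||
            (!decide (PySem.Str.len b < PySem.Str.len a) && decide (a < b))) x (y :: ys)
          = if PySem.Str.len x < PySem.Str.len y ∨ (¬ PySem.Str.len y < PySem.Str.len x ∧ x < y)
            then x :: y :: ys
            else y :: PySem.List.insertBy (fun a b => decide (PySem.Str.len a < PySem.Str.len b) ||
              (!decide (PySem.Str.len b < PySem.Str.len a) && decide (a < b))) x ys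
          from by simp [PySem.List.insertBy, Bool.or_eq_true, Bool.and_eq_true]]
      split_ifs with h
      · have hxy : pvR x y := by
          rcases h with h | ⟨h1, h2⟩
          · exact Or.inl h
          · rcases lt_or_eq_of_le (not_lt.mp h1) with h3 | h3
            · exact Or.inl h3
            · exact Or.inr ⟨h3, le_of_lt h2⟩
        refine List.Pairwise.cons (fun w hw => ?_) hacc
        rcases List.mem_cons.mp hw with rfl | hw
        · exact hxy
        · have hyw := (List.pairwise_cons.mp hacc).1 w hw
          rcases hxy with h1 | ⟨h1, h1'⟩
          · rcases hyw with h2 | h2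
            · exact Or.inl (h1.trans h2)
            · exact Or.inl (lt_of_lt_of_le h1 (le_of_eq h2.1))
          · rcases hyw with h2 | ⟨h2, h2'⟩
            · exact Or.inl (lt_of_le_of_lt (le_of_eq h1) h2)
            · exact Or.inr ⟨h1.trans h2, h1'.trans h2'⟩
      · have h1 : ¬ PySem.Str.len x < PySem.Str.len y := fun hp => h (Or.inl hp)
        refine List.Pairwise.cons (fun w hw => ?_) ?_
        · rcases (PySem.List.mem_insertBy _ x w ys).mp hw with rfl | hw
          · rcases lt_or_eq_of_le (not_lt.mp h1) with h2 | h2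
            · exact Or.inl h2
            · refine Or.inr ⟨h2, not_lt.mp (fun hxy => h (Or.inr ⟨by omega, hxy⟩))⟩
          · exact (List.pairwise_cons.mp hacc).1 w hw
        · exact ih (List.pairwise_cons.mp hacc).2

theorem pv_foldB (l : List String) :
    ∀ acc, acc.Pairwise pvR →
      (l.foldl (fun acc x =>
        PySem.List.insertBy (fun a b => decide (PySem.Str.len a < PySem.Str.len b) ||
          (!decide (PySem.Str.len b < PySem.Str.len a) && decide (a < b))) x acc) acc).Pairwise pvR := by
  induction l with
  | nil => intro acc hacc; simpa using hacc
  | cons x t ih =>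
      intro acc hacc
      simp only [List.foldl_cons]
      exact ih _ (pv_insB x acc hacc)

theorem pv_pairwiseB (l : List String) :
    (PySem.List.sorted2 l PySem.Str.len (fun s => s) false).Pairwise pvR := by
  have h : PySem.List.sorted2 l PySem.Str.len (fun s => s) false
      = l.foldl (fun acc x =>
          PySem.List.insertBy (fun a b => decide (PySem.Str.len a < PySem.Str.len b) ||
            (!decide (PySem.Str.len b < PySem.Str.len a) && decide (a < b))) x acc) [] := rfl
  rw [h]
  exact pv_foldB l [] (by simp)

theorem pv_comboA (attributes : List String) :
    combo attributes
    = PySem.List.sorted (PySem.List.sorted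
        ((List.range attributes.length).flatMap
          (fun k => (PySem.List.combinations attributes (k + 1)).map pvF))
        (fun s => s) false) PySem.Str.len false := by
  show PySem.List.sorted (PySem.List.sorted
      ((PySem.List.pyRange 0 (PySem.List.len attributes) 1).foldl (fun temp i =>
        if i == 0 then
          attributes.foldl (fun temp j => temp ++ [j]) temp
        else
          (PySem.List.combinations attributes (i + 1).toNat).foldl
            (fun temp c => temp ++ [pvF c]) temp) [])
      (fun s => s) false) PySem.Str.len false = _
  rw [pv_tempA]

theorem pv_comboB (attributes : List String) :
    combo_alt attributes
    = PySem.List.sorted2 ((attributes.sublists.filter (fun s => !s.isEmpty)).map pvF)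
        PySem.Str.len (fun s => s) false := by
  show PySem.List.sorted2
      (((attributes.foldl (fun subsets a => subsets ++ subsets.map (fun s => s ++ [a]))
          [[]]).filter (fun s => !s.isEmpty)).map pvF)
      PySem.Str.len (fun s => s) false = _
  rw [pv_doubling]

-- ===== VERDICT (by name: the statement is the Claim_ definition above) =====
theorem combo_spec : Claim_equal_combo := by
  intro attributes _
  show combo attributes = combo_alt attributes
  have hperm : (combo attributes).Perm (combo_alt attributes) := by
    rw [pv_comboA, pv_comboB, ← List.map_flatMap]
    exact ((PySem.List.sorted_perm _ _ _).trans ((PySem.List.sorted_perm _ _ _).trans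
      ((pv_perm attributes).map pvF))).trans (PySem.List.sorted2_perm _ _ _ _).symm
  have pwA : (combo attributes).Pairwise pvR := by
    rw [pv_comboA]
    refine pv_pairwiseA _ ?_
    have hs := PySem.List.sorted_pairwise (α := String) (κ := String)
      ((List.range attributes.length).flatMap
        (fun k => (PySem.List.combinations attributes (k + 1)).map pvF)) (fun s => s)
    simpa using hs
  have pwB : (combo_alt attributes).Pairwise pvR := by
    rw [pv_comboB]
    exact pv_pairwiseB _
  exact PySem.List.eq_of_perm_of_pairwise_le_of_injective pvK pvK_inj hperm
    (pwA.imp (fun h => (pvK_le_iff _ _).mpr h))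
    (pwB.imp (fun h => (pvK_le_iff _ _).mpr h))
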